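-- pv_equiv track=rewrite | github.com/connorbode/filestoragevm | cli/cli.py | unpack_headers
-- ===== SOURCE A (Python) =====
-- def unpack_headers(data, sizes):
-- 	previous = 0
-- 	sections = []
-- 	for size in sizes:
-- 		section = data[previous:previous+size]
-- 		sections.append(section)
-- 		previous += size
-- 	return sections
-- ===== SOURCE B (Python) =====
-- def unpack_headers(data, sizes):
-- 	# Build the table of cumulative boundary offsets first, then slice between
-- 	# consecutive boundaries in a separate pass.
-- 	bounds = [0]
-- 	for size in sizes:
-- 		bounds.append(bounds[-1] + size)
-- 	return [data[a:b] for a, b in zip(bounds, bounds[1:])]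
-- ===== Notes on version B (the rewrite author's own statement) =====
-- stated objective: alternative
-- what changed: B precomputes a prefix-sum boundary table and slices between consecutive zipped boundary pairs in a second pass, instead of threading a running offset while appending slices in one loop.
import Mathlib
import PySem

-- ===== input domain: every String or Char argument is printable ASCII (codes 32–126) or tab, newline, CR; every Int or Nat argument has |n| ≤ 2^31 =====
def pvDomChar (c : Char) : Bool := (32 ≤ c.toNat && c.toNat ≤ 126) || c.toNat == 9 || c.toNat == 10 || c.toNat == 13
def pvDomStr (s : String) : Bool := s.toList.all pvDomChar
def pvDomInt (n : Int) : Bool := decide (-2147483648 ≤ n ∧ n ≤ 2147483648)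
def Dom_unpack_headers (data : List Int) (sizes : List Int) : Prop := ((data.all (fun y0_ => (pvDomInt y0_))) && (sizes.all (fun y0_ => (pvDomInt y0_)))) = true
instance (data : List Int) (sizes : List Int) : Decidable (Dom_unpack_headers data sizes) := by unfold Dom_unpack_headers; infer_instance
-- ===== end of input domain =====

-- B builds a prefix-sum boundary table and slices between consecutive boundary pairs
-- (different decomposition, same cost); A threads a running offset in one loop.

-- ===== PORT A =====
-- one loop, state = (previous, sections)
def unpack_headers (data : List Int) (sizes : List Int) : List (List Int) :=
  (sizes.foldl
    (fun (st : Int × List (List Int)) size =>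
      (st.1 + size, st.2 ++ [PySem.List.slice data (some st.1) (some (st.1 + size))]))
    (0, [])).2

-- ===== PORT B =====
-- first pass: bounds = [0]; for size in sizes: bounds.append(bounds[-1] + size)
def pvBounds (sizes : List Int) : List Int :=
  sizes.foldl (fun bs size => bs ++ [bs.getLastD 0 + size]) [0]

-- second pass: [data[a:b] for a, b in zip(bounds, bounds[1:])]
def unpack_headers_alt (data : List Int) (sizes : List Int) : List (List Int) :=
  let bounds := pvBounds sizes
  (bounds.zip (PySem.List.slice bounds (some 1) none)).map
    (fun ab => PySem.List.slice data (some ab.1) (some ab.2))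

-- ===== PRECONDITION & SPEC =====
def Spec_unpack_headers (data : List Int) (sizes : List Int) (out : List (List Int)) : Prop := out = unpack_headers_alt data sizes
instance (data : List Int) (sizes : List Int) (out : List (List Int)) : Decidable (Spec_unpack_headers data sizes out) := by unfold Spec_unpack_headers; infer_instance

-- ===== CLAIM (what is proved, stated in full; the proofs are below) =====
def Claim_equal_unpack_headers : Prop := ∀ (data : List Int) (sizes : List Int), Dom_unpack_headers data sizes → Spec_unpack_headers data sizes (unpack_headers data sizes)

-- ===== LEMMAS AND PROOFS =====

-- common recursive characterisation: the slices starting at offset p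
def pvSpec (data : List Int) (p : Int) : List Int → List (List Int)
  | [] => []
  | s :: rest => PySem.List.slice data (some p) (some (p + s)) :: pvSpec data (p + s) rest

-- the scan of boundary offsets starting at p
def pvScan (p : Int) : List Int → List Int
  | [] => [p]
  | s :: rest => p :: pvScan (p + s) rest

lemma foldA (data : List Int) (sizes : List Int) (p : Int) (acc : List (List Int)) :
    (sizes.foldl
      (fun (st : Int × List (List Int)) size =>
        (st.1 + size, st.2 ++ [PySem.List.slice data (some st.1) (some (st.1 + size))]))
      (p, acc)).2 = acc ++ pvSpec data p sizes := by
  induction sizes generalizing p acc with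
  | nil => simp [pvSpec]
  | cons s rest ih => simp [List.foldl_cons, ih, pvSpec]

lemma foldB (sizes : List Int) (bs : List Int) (p : Int) :
    sizes.foldl (fun bs size => bs ++ [bs.getLastD 0 + size]) (bs ++ [p])
      = bs ++ pvScan p sizes := by
  induction sizes generalizing bs p with
  | nil => simp [pvScan]
  | cons s rest ih =>
    have h : (bs ++ [p]).getLastD 0 = p := by simp
    simp only [List.foldl_cons, h]
    rw [show (bs ++ [p]) ++ [p + s] = (bs ++ [p]) ++ [p + s] from rfl, ih (bs ++ [p]) (p + s)]
    simp [pvScan]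

lemma scan_head (p : Int) (l : List Int) : ∃ t, pvScan p l = p :: t := by
  cases l <;> simp [pvScan]

lemma zipB (data : List Int) (p : Int) (sizes : List Int) :
    ((pvScan p sizes).zip ((pvScan p sizes).drop 1)).map
      (fun ab => PySem.List.slice data (some ab.1) (some ab.2)) = pvSpec data p sizes := by
  induction sizes generalizing p with
  | nil => simp [pvScan, pvSpec]
  | cons s rest ih =>
    obtain ⟨t, ht⟩ := scan_head (p + s) rest
    simp only [pvScan, pvSpec, List.drop_succ_cons, List.drop_zero]
    rw [ht]
    simp only [List.zip_cons_cons, List.map_cons]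
    rw [← ht]
    have : (pvScan (p + s) rest).drop 1 = t := by rw [ht]; rfl
    rw [← this, ih]

-- ===== VERDICT (by name: the statement is the Claim_ definition above) =====
theorem unpack_headers_spec : Claim_equal_unpack_headers := by
  intro data sizes _
  unfold Spec_unpack_headers unpack_headers unpack_headers_alt pvBounds
  rw [show ([0] : List Int) = [] ++ [0] from rfl, foldB, foldA]
  simp only [List.nil_append]
  rw [PySem.List.slice_from (xs := pvScan 0 sizes) (a := 1) (by norm_num)]
  exact (zipB data 0 sizes).symm
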